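-- pv_equiv track=rewrite | github.com/PremPatel8/Competitive_Coding | Binarysearch.com/Count of Sublists with Same First and Last Values.py | solve
-- ===== SOURCE A (Python) =====
-- from collections import defaultdict
--
-- def solve(nums):
--     res = num_len = len(nums)
--
--     if num_len == 1:
--         return res
--
--     numdict = defaultdict(list)
--
--     for itr, no in enumerate(nums):
--         numdict[no].append(itr)
--
--     for key in numdict:
--         index_num = len(numdict[key])
--         if index_num > 1:
--             res += (((index_num-1) * index_num) // 2)
--
--     return res
-- ===== SOURCE B (Python) =====
-- def solve(nums):
--     seen = {}
--     res = 0
--     for x in nums: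
--         c = seen.get(x, 0) + 1
--         seen[x] = c
--         res += c
--     return res
-- ===== Notes on version B (the rewrite author's own statement) =====
-- stated objective: simpler
-- what changed: Replaces A's two-phase scheme (group all indices per value into a dict of lists, then add C(c,2) per group to len(nums)) with a single online pass that keeps only a running count per value and adds the current multiplicity of each element, which equals the number of new equal-endpoint sublists ending there.
import Mathlib
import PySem

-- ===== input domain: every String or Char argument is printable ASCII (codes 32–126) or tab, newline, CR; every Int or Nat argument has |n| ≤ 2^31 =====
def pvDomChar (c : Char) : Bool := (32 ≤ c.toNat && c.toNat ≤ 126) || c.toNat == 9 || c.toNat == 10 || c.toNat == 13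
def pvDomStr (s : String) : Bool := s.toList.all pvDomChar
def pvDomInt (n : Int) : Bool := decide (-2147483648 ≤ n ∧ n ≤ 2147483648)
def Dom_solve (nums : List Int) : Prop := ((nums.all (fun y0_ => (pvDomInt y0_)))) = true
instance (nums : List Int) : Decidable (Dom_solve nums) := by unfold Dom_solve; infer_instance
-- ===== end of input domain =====

-- B replaces A's two-phase group-indices-then-C(c,2) scheme by a single counting pass
-- that adds each element's running multiplicity (objective: simpler).


-- ===== PORT A =====
def solve (nums : List Int) : Int :=
  let numLen : Int := nums.length
  let res : Int := numLen
  if numLen = 1 then res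
  else
    let numdict : PySem.Dict Int (List Int) :=
      (PySem.List.enumerate nums).foldl (fun d p => d.modify p.2 [] (· ++ [p.1])) PySem.Dict.empty
    numdict.keys.foldl
      (fun res key =>
        let indexNum : Int := ((numdict.getD key []).length : Int)
        if indexNum > 1 then res + PySem.Int.floordiv ((indexNum - 1) * indexNum) 2 else res)
      res

-- ===== PORT B =====
def solve_alt (nums : List Int) : Int :=
  (nums.foldl
    (fun (st : PySem.Dict Int Int × Int) x =>
      let c := st.1.getD x 0 + 1
      (st.1.insert x c, st.2 + c))
    (PySem.Dict.empty, 0)).2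

-- ===== PRECONDITION & SPEC =====
def Spec_solve (nums : List Int) (out : Int) : Prop := out = solve_alt nums
instance (nums : List Int) (out : Int) : Decidable (Spec_solve nums out) := by unfold Spec_solve; infer_instance

-- ===== CLAIM (what is proved, stated in full; the proofs are below) =====
def Claim_equal_solve : Prop := ∀ (nums : List Int), Dom_solve nums → Spec_solve nums (solve nums)

-- ===== LEMMAS AND PROOFS =====

-- C(n,2) = n*(n-1)/2 and the triangular number n*(n+1)/2, as Int values of a Nat count
def chooseTwo (n : Nat) : Int := ((n * (n - 1) / 2 : Nat) : Int)
def tri (n : Nat) : Int := ((n * (n + 1) / 2 : Nat) : Int)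

-- sum over the distinct values of l of f applied to the multiplicity of each value
def countSum (l : List Int) (f : Nat → Int) : Int :=
  ((PySem.Set.ofList l).map (fun k => f (l.count k))).sum

theorem chooseTwo_succ (n : Nat) : chooseTwo (n + 1) = chooseTwo n + n := by
  unfold chooseTwo
  have h : (n + 1) * (n + 1 - 1) = n * (n - 1) + 2 * n := by
    cases n with
    | zero => rfl
    | succ m => simp; ring
  rw [h, Nat.add_mul_div_left _ _ (by norm_num : 0 < 2)]
  push_cast; ring

theorem tri_succ (n : Nat) : tri (n + 1) = tri n + n + 1 := by
  unfold tri
  have h : (n + 1) * (n + 1 + 1) = n * (n + 1) + 2 * (n + 1) := by ring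
  rw [h, Nat.add_mul_div_left _ _ (by norm_num : 0 < 2)]
  push_cast; ring

-- sums over a Nodup list of two functions agreeing away from one member x
theorem sum_map_update (x : Int) (f g : Int → Int) :
    ∀ (s : List Int), s.Nodup → x ∈ s → (∀ k ∈ s, k ≠ x → f k = g k) →
      (s.map f).sum = (s.map g).sum + f x - g x := by
  intro s
  induction s with
  | nil => intro _ hx; exact absurd hx (List.not_mem_nil)
  | cons a s ih =>
    intro hnd hx h
    rcases List.mem_cons.mp hx with rfl | hxs
    · have hxns : x ∉ s := (List.nodup_cons.mp hnd).1
      have : s.map f = s.map g := List.map_congr_left (fun k hk =>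
        h k (List.mem_cons_of_mem _ hk) (fun he => hxns (he ▸ hk)))
      simp [this]; ring
    · have ha : a ≠ x := fun he => (List.nodup_cons.mp hnd).1 (he ▸ hxs)
      have := ih (List.nodup_cons.mp hnd).2 hxs (fun k hk => h k (List.mem_cons_of_mem _ hk))
      simp [this, h a (List.mem_cons_self) ha]; ring

-- appending one element changes countSum by f(c+1) - f(c) at the appended value
theorem countSum_snoc (l : List Int) (x : Int) (f : Nat → Int) (hf0 : f 0 = 0) :
    countSum (l ++ [x]) f = countSum l f + f (l.count x + 1) - f (l.count x) := by
  unfold countSum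
  rw [PySem.Set.ofList_append_singleton]
  by_cases hx : x ∈ (PySem.Set.ofList l : List Int)
  · rw [PySem.Set.add_of_mem hx]
    rw [sum_map_update x (fun k => f ((l ++ [x]).count k)) (fun k => f (l.count k))
          _ (PySem.Set.nodup_ofList _) hx
          (fun k _ hk => by simp [List.count_append, Ne.symm hk])]
    simp [List.count_append]
  · rw [PySem.Set.add_of_not_mem hx, List.map_append, List.sum_append]
    have hxl : x ∉ l := fun h => hx ((PySem.Set.mem_ofList _ _).mpr h)
    have hcx : l.count x = 0 := List.count_eq_zero.mpr hxl
    have hmap : (PySem.Set.ofList l : List Int).map (fun k => f ((l ++ [x]).count k))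
        = (PySem.Set.ofList l : List Int).map (fun k => f (l.count k)) := by
      refine List.map_congr_left (fun k hk => ?_)
      have hkx : k ≠ x := fun he => hxl (he ▸ (PySem.Set.mem_ofList _ _).mp hk)
      simp [List.count_append, Ne.symm hkx]
    rw [hmap]
    simp [List.count_append, List.count_singleton, hcx, hf0]

-- length + Σ C(c,2) = Σ c(c+1)/2 over the multiset of multiplicities
theorem len_add_chooseTwo_eq_tri :
    ∀ (l : List Int), (l.length : Int) + countSum l chooseTwo = countSum l tri := by
  intro l
  induction l using List.reverseRecOn with
  | nil => simp [countSum, PySem.Set.ofList_nil]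
  | append_singleton l x ih =>
    rw [countSum_snoc l x chooseTwo rfl, countSum_snoc l x tri rfl,
        chooseTwo_succ, tri_succ]
    simp only [List.length_append, List.length_singleton]
    push_cast
    omega

-- the enumerate pairs carry each value of nums exactly count-many times (as second component)
theorem countP_enumerate (k : Int) :
    ∀ (xs : List Int) (s : Int),
      (PySem.List.enumerate xs s).countP (fun p => p.2 == k) = xs.count k := by
  intro xs
  induction xs with
  | nil => intro s; simp [PySem.List.enumerate_nil]
  | cons a xs ih =>
    intro s
    rw [PySem.List.enumerate_cons]
    by_cases h : a = k <;>
      simp [ih (s + 1), h, beq_iff_eq]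

theorem solve_eq (l : List Int) : solve l = (l.length : Int) + countSum l chooseTwo := by
  unfold solve
  by_cases h1 : (l.length : Int) = 1
  · rcases List.length_eq_one_iff.mp (by exact_mod_cast h1) with ⟨a, rfl⟩
    simp [countSum, PySem.Set.ofList, PySem.Set.add, chooseTwo]
  · simp only [h1, if_false]
    set dct := (PySem.List.enumerate l).foldl
      (fun d p => d.modify p.2 [] (· ++ [p.1])) PySem.Dict.empty with hdct
    -- the grouped index list at any key has length = multiplicity of the key
    have hlen : ∀ k : Int, (dct.getD k []).length = l.count k := by
      intro k
      have hswap : dct = ((PySem.List.enumerate l).map (fun p => (p.2, p.1))).foldl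
          (fun d q => d.modify q.1 [] (· ++ [q.2])) PySem.Dict.empty := by
        rw [hdct, List.foldl_map]
      rw [hswap, PySem.Dict.getD_foldl_modify_append]
      simp only [PySem.Dict.getD_empty, List.nil_append, List.length_map,
        List.filter_map, ← List.countP_eq_length_filter]
      exact countP_enumerate k l 0
    -- the keys are the distinct values of l
    have hkeys : dct.keys = PySem.Set.ofList l := by
      rw [hdct, PySem.Dict.keys_foldl_modify_key (key := fun p : Int × Int => p.2)]
      simp [PySem.Dict.keys_empty, PySem.Set.update_nil_left, PySem.List.map_snd_enumerate]
    rw [hkeys]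
    refine Eq.trans (PySem.List.foldl_congr_mem _ _
      (fun res key => res + chooseTwo (l.count key)) _
      (by
        intro acc k hk
        have hkl : k ∈ l := (PySem.Set.mem_ofList _ _).mp hk
        have hc1 : 1 ≤ l.count k := List.one_le_count_iff.mpr hkl
        rw [hlen k]
        by_cases h2 : 2 ≤ l.count k
        · have hgt : ((l.count k : Int)) > 1 := by exact_mod_cast h2
          simp only [hgt, if_pos]
          have hcast : ((l.count k : Int) - 1) * (l.count k : Int)
              = (((l.count k - 1) * l.count k : Nat) : Int) := by
            push_cast [Nat.cast_sub hc1]; ring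
          rw [hcast]
          rw [show (2 : Int) = ((2 : Nat) : Int) from rfl, PySem.Int.floordiv_natCast]
          unfold chooseTwo
          congr 1
          rw [Nat.mul_comm]
        · have hc : l.count k = 1 := by omega
          simp [hc, chooseTwo])) ?_
    rw [PySem.List.foldl_add]
    rfl

-- the dict component of B's fold is the plain counter fold
theorem solve_alt_fst :
    ∀ (l : List Int) (d : PySem.Dict Int Int) (r : Int),
      (l.foldl (fun (st : PySem.Dict Int Int × Int) x =>
          let c := st.1.getD x 0 + 1
          (st.1.insert x c, st.2 + c)) (d, r)).1
        = l.foldl (fun d x => d.insert x (d.getD x 0 + 1)) d := by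
  intro l
  induction l with
  | nil => intro d r; rfl
  | cons a l ih => intro d r; simp only [List.foldl_cons]; exact ih _ _

theorem solve_alt_eq (l : List Int) : solve_alt l = countSum l tri := by
  unfold solve_alt
  induction l using List.reverseRecOn with
  | nil => simp [countSum, PySem.Set.ofList_nil]
  | append_singleton l x ih =>
    rw [List.foldl_append]
    simp only [List.foldl_cons, List.foldl_nil]
    rw [solve_alt_fst l PySem.Dict.empty 0]
    have hcnt : (l.foldl (fun d x => d.insert x (d.getD x 0 + 1))
        (PySem.Dict.empty : PySem.Dict Int Int)).getD x 0 = l.count x := by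
      rw [PySem.Dict.getD_foldl_insert_add_one]
      simp [PySem.Dict.getD_empty]
    rw [countSum_snoc l x tri rfl, tri_succ]
    simp only [hcnt, ih]
    omega

-- ===== VERDICT (by name: the statement is the Claim_ definition above) =====
theorem solve_spec : Claim_equal_solve := by
  intro nums _
  unfold Spec_solve
  rw [solve_eq, solve_alt_eq, len_add_chooseTwo_eq_tri]
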